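-- pv_equiv track=rewrite | github.com/OSU-slatelab/JET | experiments/lib/drgriffis/common/util.py | sortFrequencyDictionary
-- ===== SOURCE A (Python) =====
-- def sortFrequencyDictionary(freq_dict, descending=True):
--     '''Returns a list of (item, frequency) pairs, in sorted order
--     '''
--     mapper = {}
--     for (item, freq) in freq_dict.items():
--         if mapper.get(freq, None) is None:
--             mapper[freq] = []
--         mapper[freq].append(item)
--
--     freqs = list(mapper.keys())
--     freqs.sort()
--     if descending: freqs.reverse()
--
--     sorted_pairs = []
--     for freq in freqs:
--         sorted_pairs.extend([(item, freq) for item in mapper[freq]])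
--     return sorted_pairs
-- ===== SOURCE B (Python) =====
-- def sortFrequencyDictionary(freq_dict, descending=True):
--     '''Returns a list of (item, frequency) pairs, in sorted order
--     '''
--     return sorted(freq_dict.items(), key=lambda kv: kv[1], reverse=descending)
-- ===== Notes on version B (the rewrite author's own statement) =====
-- stated objective: idiomatic
-- what changed: Replaces the frequency-to-items bucket index (dict build, key sort, reverse, bucket concatenation) with a single stable key-based sort of the items, relying on sort stability and reverse=descending to preserve within-frequency insertion order.
import Mathlib
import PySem

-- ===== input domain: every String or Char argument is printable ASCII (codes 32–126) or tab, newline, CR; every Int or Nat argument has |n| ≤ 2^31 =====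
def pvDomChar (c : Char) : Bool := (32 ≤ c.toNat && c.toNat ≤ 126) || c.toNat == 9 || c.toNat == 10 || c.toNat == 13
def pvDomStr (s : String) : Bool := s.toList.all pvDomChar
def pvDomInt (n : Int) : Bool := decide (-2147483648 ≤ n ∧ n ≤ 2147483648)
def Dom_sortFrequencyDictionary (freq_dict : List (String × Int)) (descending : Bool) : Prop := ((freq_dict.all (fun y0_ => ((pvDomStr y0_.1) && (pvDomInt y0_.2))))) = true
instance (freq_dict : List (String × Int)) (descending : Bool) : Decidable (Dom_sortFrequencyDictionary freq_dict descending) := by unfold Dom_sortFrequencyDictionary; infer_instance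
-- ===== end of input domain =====

-- B replaces A's frequency→items bucket index with one stable key-based sort (idiomatic); same results.

-- ===== PORT A =====
-- mapper[freq].append(item) on an existing key: modify with default [] (the key is present, so the default is never used)
def sortFrequencyDictionary (freq_dict : List (String × Int)) (descending : Bool) : List (String × Int) :=
  let mapper := freq_dict.foldl (fun m p =>
      let m := if m.get? p.2 = none then m.insert p.2 ([] : List String) else m
      m.modify p.2 [] (fun l => l ++ [p.1])) PySem.Dict.empty
  let freqs := PySem.List.sorted mapper.keys (fun k => k) false
  let freqs := if descending then freqs.reverse else freqs
  freqs.foldl (fun acc f => acc ++ (mapper.getD f []).map (fun item => (item, f))) []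

-- ===== PORT B =====
def sortFrequencyDictionary_alt (freq_dict : List (String × Int)) (descending : Bool) : List (String × Int) :=
  PySem.List.sorted freq_dict (fun kv => kv.2) descending

-- ===== PRECONDITION & SPEC =====
def Spec_sortFrequencyDictionary (freq_dict : List (String × Int)) (descending : Bool) (out : List (String × Int)) : Prop := out = sortFrequencyDictionary_alt freq_dict descending
instance (freq_dict : List (String × Int)) (descending : Bool) (out : List (String × Int)) : Decidable (Spec_sortFrequencyDictionary freq_dict descending out) := by unfold Spec_sortFrequencyDictionary; infer_instance

-- ===== CLAIM (what is proved, stated in full; the proofs are below) =====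
def Claim_equal_sortFrequencyDictionary : Prop := ∀ (freq_dict : List (String × Int)) (descending : Bool), Dom_sortFrequencyDictionary freq_dict descending → Spec_sortFrequencyDictionary freq_dict descending (sortFrequencyDictionary freq_dict descending)

-- ===== LEMMAS AND PROOFS =====

-- A's loop body (insert [] if the key is new, then append) is exactly one 'modify' with default []
theorem step_eq_modify (m : PySem.Dict Int (List String)) (p : String × Int) :
    (if m.get? p.2 = none then m.insert p.2 ([] : List String) else m).modify p.2 [] (fun l => l ++ [p.1])
      = m.modify p.2 [] (fun l => l ++ [p.1]) := by
  by_cases h : m.get? p.2 = none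
  · simp [h, PySem.Dict.modify, PySem.Dict.insert_insert_self, PySem.Dict.getD_eq_get?_getD]
  · simp [h]

-- the mapper's bucket at k is the items of xs whose frequency is k, in order
theorem mapper_getD (xs : List (String × Int)) (k : Int) :
    ((xs.foldl (fun m p => m.modify p.2 [] (fun l => l ++ [p.1])) PySem.Dict.empty).getD k [])
      = (xs.filter (fun p => p.2 == k)).map (fun p => p.1) := by
  have h := PySem.Dict.getD_foldl_modify_append (xs.map (fun p => (p.2, p.1))) (PySem.Dict.empty (κ := Int) (ν := List String)) k
  rw [List.foldl_map] at h
  simpa [List.filter_map, Function.comp] using h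

theorem mapper_keys (xs : List (String × Int)) :
    (xs.foldl (fun m p => m.modify p.2 [] (fun l => l ++ [p.1])) PySem.Dict.empty).keys
      = PySem.Set.ofList (xs.map (fun p => p.2)) := by
  have h := PySem.Dict.keys_foldl_modify_key xs (fun p : String × Int => p.2) ([] : List String)
      (fun _ p l => l ++ [p.1]) PySem.Dict.empty
  simpa [PySem.Set.update_empty] using h

-- re-tagging a bucket's items with their common frequency gives back the filtered pairs
theorem map_retag (xs : List (String × Int)) (k : Int) :
    ((xs.filter (fun p => p.2 == k)).map (fun p => p.1)).map (fun item => (item, k))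
      = xs.filter (fun p => p.2 == k) := by
  rw [List.map_map]
  have h : ∀ p ∈ xs.filter (fun p => p.2 == k), ((fun item => (item, k)) ∘ (fun p : String × Int => p.1)) p = id p := by
    intro p hp
    have h2 : p.2 = k := by simpa using (List.mem_filter.mp hp).2
    simp [Function.comp, Prod.ext_iff, h2]
  rw [List.map_congr_left h, List.map_id]

-- insert x into A ++ B when x goes after all of A and before all of B
theorem insertBy_middle {α : Type} (before : α → α → Bool) (x : α) (A B : List α)
    (hA : ∀ a ∈ A, before x a = false) (hB : ∀ b ∈ B, before x b = true) :
    PySem.List.insertBy before x (A ++ B) = A ++ x :: B := by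
  induction A with
  | nil =>
    cases B with
    | nil => simp [PySem.List.insertBy]
    | cons b bs => simp [PySem.List.insertBy, hB b (by simp)]
  | cons a as ih =>
    have ha := hA a (by simp)
    simp [PySem.List.insertBy, ha, ih (fun a h => hA a (by simp [h]))]

-- insert x past a prefix x goes after
theorem insertBy_append_not_before {α : Type} (before : α → α → Bool) (x : α) (A B : List α)
    (hA : ∀ a ∈ A, before x a = false) :
    PySem.List.insertBy before x (A ++ B) = A ++ PySem.List.insertBy before x B := by
  induction A with
  | nil => simp
  | cons a as ih =>
    have ha := hA a (by simp)
    simp [PySem.List.insertBy, ha, ih (fun a h => hA a (by simp [h]))]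

-- inserting x into the concatenation of key-groups lands it at the end of its own group
theorem insertBy_flatMap (r : Int → Int → Prop) [DecidableRel r]
    (hirr : ∀ a, ¬ r a a) (hasym : ∀ a b, r a b → ¬ r b a)
    (xs : List (String × Int)) (x : String × Int) (ks : List Int)
    (hks : ks.Pairwise r) (hx : x.2 ∈ ks) :
    PySem.List.insertBy (fun a b => decide (r a.2 b.2)) x
        (ks.flatMap (fun k => xs.filter (fun p => p.2 == k)))
      = ks.flatMap (fun k => (xs ++ [x]).filter (fun p => p.2 == k)) := by
  induction ks with
  | nil => simp at hx
  | cons k ks ih =>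
    have hkks : ∀ k' ∈ ks, r k k' := (List.pairwise_cons.mp hks).1
    have hks' : ks.Pairwise r := (List.pairwise_cons.mp hks).2
    by_cases hk : x.2 = k
    · -- x belongs to the head group
      have hrest : ∀ k' ∈ ks, ¬ ((x.2 : Int) == k') = true := by
        intro k' hk'
        have hr := hkks k' hk'
        simp only [beq_iff_eq]
        intro he
        have hkk' : k = k' := hk.symm.trans he
        exact hirr k' (hkk' ▸ hr)
      have hfilt : ∀ k' ∈ ks, (xs ++ [x]).filter (fun p => p.2 == k') = xs.filter (fun p => p.2 == k') := by
        intro k' hk'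
        simp [List.filter_append, hrest k' hk']
      rw [List.flatMap_cons, List.flatMap_cons,
        insertBy_middle _ x (xs.filter (fun p => p.2 == k)) _
          (by
            intro a ha
            have : a.2 = k := by simpa using (List.mem_filter.mp ha).2
            simp [this, hk, hirr k])
          (by
            intro b hb
            obtain ⟨k', hk', hbk⟩ := List.mem_flatMap.mp hb
            have : b.2 = k' := by simpa using (List.mem_filter.mp hbk).2
            simp [this, hk, hkks k' hk'])]
      have : (xs ++ [x]).filter (fun p => p.2 == k) = xs.filter (fun p => p.2 == k) ++ [x] := by
        simp [List.filter_append, hk]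
      rw [this, List.flatMap_congr (fun k' hk' => hfilt k' hk')]
      simp
    · -- x belongs to a later group
      have hxks : x.2 ∈ ks := by
        rcases List.mem_cons.mp hx with h | h
        · exact absurd h hk
        · exact h
      have hfiltk : (xs ++ [x]).filter (fun p => p.2 == k) = xs.filter (fun p => p.2 == k) := by
        simp [List.filter_append, hk]
      rw [List.flatMap_cons, List.flatMap_cons, hfiltk,
        insertBy_append_not_before _ x _ _
          (by
            intro a ha
            have ha2 : a.2 = k := by simpa using (List.mem_filter.mp ha).2
            have hr : r k x.2 := hkks _ hxks
            simp [ha2]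
            exact hasym _ _ hr),
        ih hks' hxks]

-- main: A's group-by-key concatenation IS the stable insertion sort by key
theorem sort_eq_flatMap_groups (r : Int → Int → Prop) [DecidableRel r]
    (hirr : ∀ a, ¬ r a a) (hasym : ∀ a b, r a b → ¬ r b a)
    (xs : List (String × Int)) (ks : List Int)
    (hks : ks.Pairwise r) (hcov : ∀ p ∈ xs, p.2 ∈ ks) :
    xs.foldl (fun acc x => PySem.List.insertBy (fun a b => decide (r a.2 b.2)) x acc) []
      = ks.flatMap (fun k => xs.filter (fun p => p.2 == k)) := by
  induction xs using List.reverseRecOn with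
  | nil => simp
  | append_singleton xs x ih =>
    rw [List.foldl_append, List.foldl_cons, List.foldl_nil,
      ih (fun p hp => hcov p (by simp [hp])),
      insertBy_flatMap r hirr hasym xs x ks hks (hcov x (by simp))]

theorem flatMap_groups (xs : List (String × Int)) (ks : List Int) :
    ks.flatMap (fun k => xs.filter (fun p => p.2 == k))
      = ks.flatMap (fun k => ((xs.filter (fun p => p.2 == k)).map (fun p => p.1)).map (fun item => (item, k))) := by
  exact (List.flatMap_congr (fun k _ => (map_retag xs k))).symm

-- ===== VERDICT (by name: the statement is the Claim_ definition above) =====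
theorem sortFrequencyDictionary_spec : Claim_equal_sortFrequencyDictionary := by
  intro xs descending _
  unfold Spec_sortFrequencyDictionary sortFrequencyDictionary sortFrequencyDictionary_alt
  have hmap : xs.foldl (fun m p =>
      let m := if m.get? p.2 = none then m.insert p.2 ([] : List String) else m
      m.modify p.2 [] (fun l => l ++ [p.1])) PySem.Dict.empty
      = xs.foldl (fun m p => m.modify p.2 [] (fun l => l ++ [p.1])) PySem.Dict.empty :=
    PySem.List.foldl_congr_mem _ _ _ _ (fun m p _ => step_eq_modify m p)
  simp only [hmap, mapper_keys, mapper_getD, PySem.List.foldl_append_eq_flatMap, List.nil_append]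
  have hK := PySem.List.sorted_ofList_pairwise_lt (xs.map (fun p => p.2))
  have hcov : ∀ p ∈ xs, p.2 ∈ PySem.List.sorted (PySem.Set.ofList (xs.map (fun p => p.2))) (fun k => k) false := by
    intro p hp
    rw [PySem.List.mem_sorted, PySem.Set.mem_ofList]
    exact List.mem_map.mpr ⟨p, hp, rfl⟩
  cases descending with
  | false =>
    rw [if_neg (by simp), ← flatMap_groups,
      ← sort_eq_flatMap_groups (fun a b => a < b) (fun a => lt_irrefl a) (fun a b h => not_lt.mpr h.le) xs _ hK hcov]
    rfl
  | true =>
    rw [if_pos rfl, ← flatMap_groups,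
      ← sort_eq_flatMap_groups (fun a b => b < a) (fun a => lt_irrefl a) (fun a b h => not_lt.mpr h.le) xs _
        ((List.pairwise_reverse).mpr hK)
        (fun p hp => by simpa using hcov p hp)]
    rw [PySem.List.sorted_rev_eq_foldl_insertBy]
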